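-- pv_equiv track=rewrite | github.com/LukaszKk/AdventOfCode2023 | day5/part2.py | map_reader
-- ===== SOURCE A (Python) =====
-- def map_reader(lines: list[str], line_to_search: str) -> list[str]:
--     should_read = False
--     data_map = []
--     for line in lines:
--         line = line.strip()
--         if not line and should_read:
--             break
--         if line == line_to_search:
--             should_read = True
--             continue
--         if should_read:
--             data_map.append(line)
--     return data_map
-- ===== SOURCE B (Python) =====
-- def map_reader(lines: list[str], line_to_search: str) -> list[str]:
--     stripped = [line.strip() for line in lines]
--     if line_to_search not in stripped:
--         return []
--     rest = stripped[stripped.index(line_to_search) + 1:]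
--     end = rest.index('') if '' in rest else len(rest)
--     return [l for l in rest[:end] if l != line_to_search]
-- ===== Notes on version B (the rewrite author's own statement) =====
-- stated objective: simpler
-- what changed: Replaces the stateful single pass with a mutable should_read flag by a declarative two-phase slice: strip all lines, locate the header with index, slice off everything up to the first blank line after it, and filter out repeated headers.
import Mathlib
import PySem

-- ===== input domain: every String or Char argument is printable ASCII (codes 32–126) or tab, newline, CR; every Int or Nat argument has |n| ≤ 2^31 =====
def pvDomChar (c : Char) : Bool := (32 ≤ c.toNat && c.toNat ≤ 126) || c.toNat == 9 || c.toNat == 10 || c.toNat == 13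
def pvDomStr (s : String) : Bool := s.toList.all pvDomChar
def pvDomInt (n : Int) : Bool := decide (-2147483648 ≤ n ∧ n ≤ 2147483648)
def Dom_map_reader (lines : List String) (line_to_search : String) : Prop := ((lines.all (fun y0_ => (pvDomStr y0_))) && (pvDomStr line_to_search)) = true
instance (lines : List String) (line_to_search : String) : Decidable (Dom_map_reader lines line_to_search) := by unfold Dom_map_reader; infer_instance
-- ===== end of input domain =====

-- B replaces A's stateful single pass (mutable should_read flag) by a declarative
-- two-phase slice: strip, locate the header by index, cut at the first blank after it,
-- filter out repeated headers. Objective: simpler. Equal return value on all inputs.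

-- ===== PORT A =====
-- literal transliteration of A's loop: state = (should_read, data_map)
def mapReaderLoop (h : String) : List String → Bool → List String → List String
  | [], _, acc => acc
  | l :: rest, sr, acc =>
    let line := PySem.Str.strip l
    if line = "" ∧ sr = true then acc                          -- if not line and should_read: break
    else if line = h then mapReaderLoop h rest true acc        -- should_read = True; continue
    else if sr then mapReaderLoop h rest sr (acc ++ [line])    -- data_map.append(line)
    else mapReaderLoop h rest sr acc

def map_reader (lines : List String) (line_to_search : String) : List String :=
  mapReaderLoop line_to_search lines false []

-- ===== PORT B =====
def map_reader_alt (lines : List String) (line_to_search : String) : List String :=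
  let stripped := lines.map PySem.Str.strip
  match PySem.List.index? stripped line_to_search with       -- 'not in' + .index
  | none => []
  | some i =>
    let rest := PySem.List.slice stripped (some ((i : Int) + 1)) none   -- stripped[i+1:]
    let e := match PySem.List.index? rest "" with            -- rest.index('') if '' in rest else len(rest)
      | some j => j
      | none => rest.length
    (rest.take e).filter (fun l => l ≠ line_to_search)       -- [l for l in rest[:end] if l != h]

-- ===== PRECONDITION & SPEC =====
def Spec_map_reader (lines : List String) (line_to_search : String) (out : List String) : Prop := out = map_reader_alt lines line_to_search
instance (lines : List String) (line_to_search : String) (out : List String) : Decidable (Spec_map_reader lines line_to_search out) := by unfold Spec_map_reader; infer_instance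

-- ===== CLAIM (what is proved, stated in full; the proofs are below) =====
def Claim_equal_map_reader : Prop := ∀ (lines : List String) (line_to_search : String), Dom_map_reader lines line_to_search → Spec_map_reader lines line_to_search (map_reader lines line_to_search)

-- ===== LEMMAS AND PROOFS =====

-- the collection phase of B: take up to the first blank, drop repeated headers
def altPhase (h : String) (xs : List String) : List String :=
  (xs.take (match PySem.List.index? xs "" with | some j => j | none => xs.length)).filter
    (fun l => l ≠ h)

lemma altPhase_cons_blank (h : String) (xs : List String) : altPhase h ("" :: xs) = [] := by
  unfold altPhase
  rw [PySem.List.index?_cons_self]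
  simp

lemma altPhase_cons_ne {x : String} (h : String) (xs : List String) (hx : x ≠ "") :
    altPhase h (x :: xs) = (if x = h then [] else [x]) ++ altPhase h xs := by
  unfold altPhase
  rw [PySem.List.index?_cons_of_ne xs hx]
  cases hidx : PySem.List.index? xs "" with
  | none => by_cases hxh : x = h <;> simp [hxh]
  | some j => by_cases hxh : x = h <;> simp [hxh]

lemma loopT (h : String) : ∀ (ls : List String) (acc : List String),
    mapReaderLoop h ls true acc = acc ++ altPhase h (ls.map PySem.Str.strip) := by
  intro ls
  induction ls with
  | nil => intro acc; simp [mapReaderLoop, altPhase]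
  | cons l ls ih =>
    intro acc
    by_cases hblank : PySem.Str.strip l = ""
    · rw [show mapReaderLoop h (l :: ls) true acc = acc by simp [mapReaderLoop, hblank]]
      rw [List.map_cons, hblank, altPhase_cons_blank, List.append_nil]
    · rw [List.map_cons, altPhase_cons_ne h _ hblank]
      by_cases hh : PySem.Str.strip l = h
      · rw [show mapReaderLoop h (l :: ls) true acc = mapReaderLoop h ls true acc by
          have hne : h ≠ "" := fun he => hblank (hh.trans he)
          simp [mapReaderLoop, hh, hne]]
        rw [ih acc, if_pos hh, List.nil_append]
      · rw [show mapReaderLoop h (l :: ls) true acc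
              = mapReaderLoop h ls true (acc ++ [PySem.Str.strip l]) by
          simp [mapReaderLoop, hblank, hh]]
        rw [ih, if_neg hh, List.append_assoc]

lemma loopF (h : String) : ∀ (ls : List String) (acc : List String),
    mapReaderLoop h ls false acc
      = acc ++ (match PySem.List.index? (ls.map PySem.Str.strip) h with
                | none => []
                | some i => altPhase h ((ls.map PySem.Str.strip).drop (i + 1))) := by
  intro ls
  induction ls with
  | nil => intro acc; simp [mapReaderLoop, PySem.List.index?]
  | cons l ls ih =>
    intro acc
    by_cases hh : PySem.Str.strip l = h
    · rw [show mapReaderLoop h (l :: ls) false acc = mapReaderLoop h ls true acc by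
        simp [mapReaderLoop, hh]]
      rw [loopT h ls acc]
      congr 1
      rw [List.map_cons, hh, PySem.List.index?_cons_self]
      simp
    · rw [show mapReaderLoop h (l :: ls) false acc = mapReaderLoop h ls false acc by
        simp [mapReaderLoop, hh]]
      rw [ih acc]
      congr 1
      rw [List.map_cons, PySem.List.index?_cons_of_ne (ls.map PySem.Str.strip) hh]
      cases hidx : PySem.List.index? (ls.map PySem.Str.strip) h with
      | none => rfl
      | some i => simp

-- ===== VERDICT (by name: the statement is the Claim_ definition above) =====
theorem map_reader_spec : Claim_equal_map_reader := by
  intro lines h _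
  unfold Spec_map_reader map_reader map_reader_alt
  rw [loopF h lines []]
  simp only [List.nil_append]
  cases hidx : PySem.List.index? (lines.map PySem.Str.strip) h with
  | none => simp
  | some i =>
    simp only
    rw [show ((i : Int) + 1) = ((i + 1 : ℕ) : Int) by push_cast; ring,
      PySem.List.slice_from_natCast]
    rfl
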